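-- pv_equiv track=rewrite | github.com/Midan14/EVOLUTION-SCRAPER | road_analyzer.py | _build_big_road
-- ===== SOURCE A (Python) =====
-- def _build_big_road(history):
--     """Construir Big Road (columnas) desde historial"""
--     if not history:
--         return []
--
--     road = []
--     current_col = []
--     last_winner = None
--
--     filtered_hist = [h for h in history if h.lower() in ("banker", "player", "b", "p")]
--
--     for res in filtered_hist:
--         w = "banker" if res.lower() in ("banker", "b") else "player"
--
--         if last_winner is None:
--             current_col.append(w)
--             last_winner = w
--         elif w == last_winner:
--             current_col.append(w)
--         else:
--             road.append(current_col)
--             current_col = [w]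
--             last_winner = w
--
--     if current_col:
--         road.append(current_col)
--
--     return road
-- ===== SOURCE B (Python) =====
-- def _build_big_road(history):
--     """Construir Big Road (columnas) desde historial"""
--     road = []
--     for h in reversed(history):
--         l = h.lower()
--         if l in ("banker", "b"):
--             w = "banker"
--         elif l in ("player", "p"):
--             w = "player"
--         else:
--             continue
--         if road and road[0][0] == w:
--             road[0].insert(0, w)
--         else:
--             road.insert(0, [w])
--     return road
-- ===== Notes on version B (the rewrite author's own statement) =====
-- stated objective: alternative
-- what changed: Builds the road back-to-front: iterates the history in reverse and prepends each normalized winner onto the front column when it matches, or pushes a fresh front column, instead of A's forward last_winner state machine with a trailing flush.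
import Mathlib
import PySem

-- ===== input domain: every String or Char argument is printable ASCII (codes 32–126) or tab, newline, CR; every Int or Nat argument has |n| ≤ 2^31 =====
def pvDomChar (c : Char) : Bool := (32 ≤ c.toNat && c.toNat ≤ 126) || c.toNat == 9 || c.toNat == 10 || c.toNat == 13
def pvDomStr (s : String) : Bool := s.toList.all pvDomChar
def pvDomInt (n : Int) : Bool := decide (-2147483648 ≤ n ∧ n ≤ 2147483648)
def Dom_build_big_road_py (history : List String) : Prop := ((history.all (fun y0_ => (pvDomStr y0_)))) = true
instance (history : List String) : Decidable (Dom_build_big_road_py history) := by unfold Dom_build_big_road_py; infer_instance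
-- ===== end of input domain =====

-- B builds the road back-to-front (reverse iteration, prepending onto the front column) instead of A's forward last_winner state machine with a trailing flush (alternative decomposition, same cost).

-- ===== PORT A =====
-- one loop iteration of A: state (road, current_col, last_winner)
def bbrStep (s : List (List String) × List String × Option String) (res : String) :
    List (List String) × List String × Option String :=
  let w := if (PySem.Str.lower res) ∈ (["banker", "b"] : List String) then "banker" else "player"
  match s with
  | (road, col, none) => (road, col ++ [w], some w)
  | (road, col, some lw) =>
      if w = lw then (road, col ++ [w], some lw)
      else (road ++ [col], [w], some w)

def build_big_road_py (history : List String) : List (List String) :=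
  if history = [] then []
  else
    let filtered := history.filter
      (fun h => decide ((PySem.Str.lower h) ∈ (["banker", "player", "b", "p"] : List String)))
    let st := filtered.foldl bbrStep ([], [], none)
    if st.2.1 ≠ [] then st.1 ++ [st.2.1] else st.1

-- ===== PORT B =====
-- body of B's 'if road and road[0][0] == w' prepend step
def bbrPrepend (w : String) (road : List (List String)) : List (List String) :=
  match road with
  | (x :: c) :: cs => if x = w then (w :: x :: c) :: cs else [w] :: (x :: c) :: cs
  | _ => [w] :: road

-- one iteration of B's 'for h in reversed(history)' loop (reverse iteration = foldr)
def bbrRevStep (h : String) (road : List (List String)) : List (List String) :=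
  let l := PySem.Str.lower h
  if l ∈ (["banker", "b"] : List String) then bbrPrepend "banker" road
  else if l ∈ (["player", "p"] : List String) then bbrPrepend "player" road
  else road

def build_big_road_py_alt (history : List String) : List (List String) :=
  history.foldr bbrRevStep []

-- ===== PRECONDITION & SPEC =====
def Spec_build_big_road_py (history : List String) (out : List (List String)) : Prop := out = build_big_road_py_alt history
instance (history : List String) (out : List (List String)) : Decidable (Spec_build_big_road_py history out) := by unfold Spec_build_big_road_py; infer_instance

-- ===== CLAIM (what is proved, stated in full; the proofs are below) =====
def Claim_equal_build_big_road_py : Prop := ∀ (history : List String), Dom_build_big_road_py history → Spec_build_big_road_py history (build_big_road_py history)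

-- ===== LEMMAS AND PROOFS =====

-- proof-side normalization: Some winner if the result counts, none otherwise
def bbrNorm (h : String) : Option String :=
  let l := PySem.Str.lower h
  if l ∈ (["banker", "b"] : List String) then some "banker"
  else if l ∈ (["player", "p"] : List String) then some "player"
  else none

-- proof-side: maximal runs of equal adjacent values (the common shape both ports compute)
def bbrRuns : List String → List (List String)
  | [] => []
  | x :: xs => (x :: xs.takeWhile (· == x)) :: bbrRuns (xs.dropWhile (· == x))
termination_by l => l.length
decreasing_by
  exact Nat.lt_succ_of_le (List.length_dropWhile_le _ xs)

-- the w computed by A's loop body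
def bbrToW (res : String) : String :=
  if (PySem.Str.lower res) ∈ (["banker", "b"] : List String) then "banker" else "player"

-- A's step with the normalization factored out
def bbrStepW (s : List (List String) × List String × Option String) (w : String) :
    List (List String) × List String × Option String :=
  match s with
  | (road, col, none) => (road, col ++ [w], some w)
  | (road, col, some lw) =>
      if w = lw then (road, col ++ [w], some lw)
      else (road ++ [col], [w], some w)

lemma bbrStep_eq (s : List (List String) × List String × Option String) (res : String) :
    bbrStep s res = bbrStepW s (bbrToW res) := by
  cases s with
  | mk road rest => cases rest with
    | mk col last => cases last <;> rfl

lemma bbrRuns_nil : bbrRuns [] = [] := by simp [bbrRuns]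

lemma bbrRuns_cons (x : String) (xs : List String) :
    bbrRuns (x :: xs) = (x :: xs.takeWhile (· == x)) :: bbrRuns (xs.dropWhile (· == x)) := by
  simp [bbrRuns]

-- per-element: the filter test and bbrNorm agree, and bbrNorm's value is bbrToW
lemma bbrNorm_cases (h : String) :
    ((decide ((PySem.Str.lower h) ∈ (["banker", "player", "b", "p"] : List String))) = true
        ∧ bbrNorm h = some (bbrToW h))
    ∨ ((decide ((PySem.Str.lower h) ∈ (["banker", "player", "b", "p"] : List String))) = false
        ∧ bbrNorm h = none) := by
  simp only [bbrNorm, bbrToW, List.mem_cons, List.not_mem_nil, or_false,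
    decide_eq_true_eq, decide_eq_false_iff_not]
  by_cases h1 : PySem.Str.lower h = "banker" <;>
    by_cases h2 : PySem.Str.lower h = "player" <;>
    by_cases h3 : PySem.Str.lower h = "b" <;>
    by_cases h4 : PySem.Str.lower h = "p" <;>
    simp [h1, h2, h3, h4]

lemma bbrNorm_filterMap (history : List String) :
    (history.filter
      (fun h => decide ((PySem.Str.lower h) ∈ (["banker", "player", "b", "p"] : List String)))).map bbrToW
      = history.filterMap bbrNorm := by
  induction history with
  | nil => rfl
  | cons h t ih =>
    rcases bbrNorm_cases h with ⟨hp, hn⟩ | ⟨hp, hn⟩ <;>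
      simp only [List.filter_cons, List.filterMap_cons, hp, hn, List.map_cons, ih,
        Bool.false_eq_true, if_true, if_false, ite_true, ite_false]

-- A's flush of the final state
def bbrFlush (st : List (List String) × List String × Option String) : List (List String) :=
  if st.2.1 ≠ [] then st.1 ++ [st.2.1] else st.1

-- loop invariant: from a non-empty current column, A produces road ++ the runs of the rest
lemma bbr_invariant (ws : List String) :
    ∀ road col lw, col ≠ [] →
      bbrFlush (ws.foldl bbrStepW (road, col, some lw))
        = road ++ ((col ++ ws.takeWhile (· == lw)) :: bbrRuns (ws.dropWhile (· == lw))) := by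
  induction ws with
  | nil => intro road col lw hc; simp [bbrFlush, hc, bbrRuns_nil]
  | cons w ws ih =>
    intro road col lw hc
    by_cases hw : w = lw
    · subst hw
      have : bbrStepW (road, col, some w) w = (road, col ++ [w], some w) := by
        simp [bbrStepW]
      simp only [List.foldl_cons, this]
      rw [ih road (col ++ [w]) w (by simp)]
      simp [List.takeWhile_cons, List.dropWhile_cons]
    · have hb : (w == lw) = false := by simp [hw]
      have : bbrStepW (road, col, some lw) w = (road ++ [col], [w], some w) := by
        simp [bbrStepW, hw]
      simp only [List.foldl_cons, this]
      rw [ih (road ++ [col]) [w] w (by simp)]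
      simp only [List.takeWhile_cons, List.dropWhile_cons, hb, Bool.false_eq_true,
        ite_false, List.append_assoc, List.singleton_append, List.cons_append,
        List.nil_append]
      rw [bbrRuns_cons]
      simp

-- A equals runs-of-normalized-winners
lemma bbr_a_eq_runs (history : List String) :
    build_big_road_py history = bbrRuns (history.filterMap bbrNorm) := by
  unfold build_big_road_py
  by_cases hh : history = []
  · simp [hh, bbrRuns_nil]
  · simp only [hh, if_neg hh, ite_false]
    have hfold : ∀ (l : List String) init, l.foldl bbrStep init = (l.map bbrToW).foldl bbrStepW init := by
      intro l
      induction l with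
      | nil => intro init; rfl
      | cons a l ihl =>
        intro init
        simp only [List.foldl_cons, List.map_cons, bbrStep_eq]
        exact ihl _
    rw [hfold, bbrNorm_filterMap]
    cases hws : history.filterMap bbrNorm with
    | nil => simp [bbrRuns_nil]
    | cons w ws =>
      have h1 : bbrStepW ([], [], none) w = ([], [w], some w) := rfl
      show bbrFlush ((w :: ws).foldl bbrStepW ([], [], none)) = _
      simp only [List.foldl_cons, h1]
      rw [bbr_invariant ws [] [w] w (by simp)]
      rw [bbrRuns_cons]
      simp

-- B's loop body, with the normalization factored out
lemma bbrRevStep_eq (h : String) (road : List (List String)) :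
    bbrRevStep h road = match bbrNorm h with
      | none => road
      | some w => bbrPrepend w road := by
  simp only [bbrRevStep, bbrNorm]
  split_ifs <;> rfl

-- prepending a winner onto the runs of ws gives the runs of w :: ws
lemma bbrPrepend_runs (w : String) (ws : List String) :
    bbrPrepend w (bbrRuns ws) = bbrRuns (w :: ws) := by
  cases ws with
  | nil => simp [bbrRuns_nil, bbrPrepend, bbrRuns_cons]
  | cons y ys =>
    rw [bbrRuns_cons]
    by_cases hy : y = w
    · subst hy
      simp [bbrPrepend, bbrRuns_cons, List.takeWhile_cons, List.dropWhile_cons]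
    · have hb : (y == w) = false := by simp [hy]
      simp [bbrPrepend, hy, bbrRuns_cons, List.takeWhile_cons, List.dropWhile_cons, hb]

-- B equals runs-of-normalized-winners
lemma bbr_b_eq_runs (history : List String) :
    build_big_road_py_alt history = bbrRuns (history.filterMap bbrNorm) := by
  unfold build_big_road_py_alt
  induction history with
  | nil => simp [bbrRuns_nil]
  | cons h t ih =>
    simp only [List.foldr_cons, List.filterMap_cons, bbrRevStep_eq, ih]
    cases hn : bbrNorm h with
    | none => simp
    | some w => simp [bbrPrepend_runs]

-- ===== VERDICT (by name: the statement is the Claim_ definition above) =====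
theorem build_big_road_py_spec : Claim_equal_build_big_road_py := by
  intro history _
  unfold Spec_build_big_road_py
  rw [bbr_a_eq_runs, bbr_b_eq_runs]
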